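-- pv_equiv track=rewrite | github.com/codepandasolutions/pdf-parser | biodata_parser/parsing/field_extractor.py | _line_looks_like_label
-- ===== SOURCE A (Python) =====
-- def _line_looks_like_label(normalized_line: str, known_labels: set[str]) -> bool:
--     if normalized_line in known_labels:
--         return True
--
--     for known_label in known_labels:
--         if normalized_line.startswith(f"{known_label}:"):
--             return True
--         if normalized_line.startswith(f"{known_label} -"):
--             return True
--         if normalized_line.startswith(f"{known_label} ="):
--             return True
--     return False
-- ===== SOURCE B (Python) =====
-- def _line_looks_like_label(normalized_line: str, known_labels: set[str]) -> bool:
--     # Different algorithm: scan the line once for separator tokens (":", " -", " ="); at each token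
--     # check whether the text before it is a known label (set lookup).
--     if normalized_line in known_labels:
--         return True
--     s = normalized_line
--     for i in range(len(s)):
--         if s[i] == ':' or (s[i] == ' ' and i + 1 < len(s) and s[i + 1] in ('-', '=')):
--             if s[:i] in known_labels:
--                 return True
--     return False
-- ===== Notes on version B (the rewrite author's own statement) =====
-- stated objective: alternative
-- what changed: Instead of testing every known label as a prefix of the line, B scans the line once for separator tokens (':', ' -', ' =') and does one set lookup of the preceding substring per token.
import Mathlib
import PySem

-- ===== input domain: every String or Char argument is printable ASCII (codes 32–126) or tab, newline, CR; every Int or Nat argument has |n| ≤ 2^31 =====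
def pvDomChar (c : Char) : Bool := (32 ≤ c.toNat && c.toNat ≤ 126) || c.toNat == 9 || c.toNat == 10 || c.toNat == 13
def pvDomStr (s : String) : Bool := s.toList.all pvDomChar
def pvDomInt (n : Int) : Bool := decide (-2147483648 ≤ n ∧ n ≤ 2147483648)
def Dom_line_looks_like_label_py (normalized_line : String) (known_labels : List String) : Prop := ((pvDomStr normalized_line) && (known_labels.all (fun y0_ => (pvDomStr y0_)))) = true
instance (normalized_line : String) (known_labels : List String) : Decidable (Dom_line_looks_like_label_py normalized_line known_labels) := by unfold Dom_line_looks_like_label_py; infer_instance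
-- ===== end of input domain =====

-- B replaces A's per-label prefix tests by a single scan of the line for the
-- separator tokens ":", " -", " =", with one set lookup of the preceding
-- substring per token (a different algorithm; not measured faster).

-- ===== PORT A =====
-- for known_label in known_labels: startswith(label+":") / (label+" -") / (label+" =")
def line_looks_like_label_py (normalized_line : String) (known_labels : List String) : Bool :=
  if known_labels.contains normalized_line then true
  else
    known_labels.any (fun l =>
      PySem.Chars.startswith normalized_line.toList (l.toList ++ [':']) ||
      PySem.Chars.startswith normalized_line.toList (l.toList ++ [' ', '-']) ||
      PySem.Chars.startswith normalized_line.toList (l.toList ++ [' ', '=']))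

-- ===== PORT B =====
-- does the rest of the line start with a separator token ":", " -" or " ="?
def pvTrig : List Char → Bool
  | ':' :: _ => true
  | ' ' :: '-' :: _ => true
  | ' ' :: '=' :: _ => true
  | _ => false

-- the scan loop of Source B: `pre` is s[:i], `rest` is s[i:]
def pvScan (known_labels : List String) (pre rest : List Char) : Bool :=
  match rest with
  | [] => false
  | c :: cs =>
      (pvTrig (c :: cs) && known_labels.contains (String.ofList pre)) || pvScan known_labels (pre ++ [c]) cs

def line_looks_like_label_py_alt (normalized_line : String) (known_labels : List String) : Bool :=
  if known_labels.contains normalized_line then true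
  else pvScan known_labels [] normalized_line.toList

-- ===== PRECONDITION & SPEC =====
def Spec_line_looks_like_label_py (normalized_line : String) (known_labels : List String) (out : Bool) : Prop := out = line_looks_like_label_py_alt normalized_line known_labels
instance (normalized_line : String) (known_labels : List String) (out : Bool) : Decidable (Spec_line_looks_like_label_py normalized_line known_labels out) := by unfold Spec_line_looks_like_label_py; infer_instance

-- ===== CLAIM (what is proved, stated in full; the proofs are below) =====
def Claim_equal_line_looks_like_label_py : Prop := ∀ (normalized_line : String) (known_labels : List String), Dom_line_looks_like_label_py normalized_line known_labels → Spec_line_looks_like_label_py normalized_line known_labels (line_looks_like_label_py normalized_line known_labels)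

-- ===== LEMMAS AND PROOFS =====

lemma pvTrig_iff (q : List Char) :
    pvTrig q = true ↔ ([':'] <+: q ∨ [' ', '-'] <+: q ∨ [' ', '='] <+: q) := by
  match q with
  | [] => simp [pvTrig]
  | [c] =>
      simp only [pvTrig.eq_def, List.cons_prefix_cons, List.prefix_nil, and_true]
      split <;> simp_all [eq_comm]
  | c :: d :: q =>
      simp only [pvTrig.eq_def, List.cons_prefix_cons, List.nil_prefix, and_true]
      split <;> simp_all [eq_comm]

lemma pvMem_iff (kl : List String) (p : List Char) :
    kl.contains (String.ofList p) = true ↔ ∃ l ∈ kl, l.toList = p := by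
  rw [List.contains_iff_mem]
  constructor
  · intro h; exact ⟨String.ofList p, h, by simp⟩
  · rintro ⟨l, hl, rfl⟩; simpa using hl

lemma pvScan_iff (kl : List String) (pre rest : List Char) :
    pvScan kl pre rest = true ↔
      ∃ p q, rest = p ++ q ∧ pvTrig q = true ∧ kl.contains (String.ofList (pre ++ p)) = true := by
  induction rest generalizing pre with
  | nil =>
      simp only [pvScan]
      constructor
      · intro h; cases h
      · rintro ⟨p, q, h, ht, -⟩
        have hp : p = [] := by cases p <;> simp_all
        have hq : q = [] := by subst hp; simp_all
        subst hp hq; simp [pvTrig] at ht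
  | cons c cs ih =>
      simp only [pvScan, Bool.or_eq_true, Bool.and_eq_true, ih]
      constructor
      · rintro (⟨ht, hm⟩ | ⟨p, q, hq, ht, hm⟩)
        · exact ⟨[], c :: cs, by simp, ht, by simpa using hm⟩
        · exact ⟨c :: p, q, by simp [hq], ht, by simpa using hm⟩
      · rintro ⟨p, q, hq, ht, hm⟩
        match p, hq with
        | [], hq =>
            simp only [List.nil_append] at hq
            subst hq
            left; exact ⟨ht, by simpa using hm⟩
        | p' :: ps, hq =>
            right
            have hc : c = p' := by simpa using congrArg (·.head?) hq
            subst hc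
            exact ⟨ps, q, by simpa using hq, ht, by simpa using hm⟩

lemma pvA_iff (kl : List String) (s : List Char) :
    (kl.any (fun l =>
      PySem.Chars.startswith s (l.toList ++ [':']) ||
      PySem.Chars.startswith s (l.toList ++ [' ', '-']) ||
      PySem.Chars.startswith s (l.toList ++ [' ', '=']))) = true ↔
      ∃ p q, s = p ++ q ∧ pvTrig q = true ∧ kl.contains (String.ofList p) = true := by
  simp only [List.any_eq_true, Bool.or_eq_true, PySem.Chars.startswith_iff]
  constructor
  · rintro ⟨l, hl, (h | h) | h⟩
    · obtain ⟨q, hq⟩ := h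
      refine ⟨l.toList, _, by rw [← hq, List.append_assoc], ?_, (pvMem_iff kl _).2 ⟨l, hl, rfl⟩⟩
      simp [pvTrig_iff]
    · obtain ⟨q, hq⟩ := h
      refine ⟨l.toList, _, by rw [← hq, List.append_assoc], ?_, (pvMem_iff kl _).2 ⟨l, hl, rfl⟩⟩
      simp [pvTrig_iff]
    · obtain ⟨q, hq⟩ := h
      refine ⟨l.toList, _, by rw [← hq, List.append_assoc], ?_, (pvMem_iff kl _).2 ⟨l, hl, rfl⟩⟩
      simp [pvTrig_iff]
  · rintro ⟨p, q, rfl, ht, hm⟩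
    obtain ⟨l, hl, rfl⟩ := (pvMem_iff kl p).1 hm
    rcases (pvTrig_iff q).1 ht with ⟨r, hr⟩ | ⟨r, hr⟩ | ⟨r, hr⟩
    · refine ⟨l, hl, Or.inl (Or.inl ?_)⟩; exact ⟨r, by rw [← hr, List.append_assoc]⟩
    · refine ⟨l, hl, Or.inl (Or.inr ?_)⟩; exact ⟨r, by rw [← hr, List.append_assoc]⟩
    · refine ⟨l, hl, Or.inr ?_⟩; exact ⟨r, by rw [← hr, List.append_assoc]⟩

-- ===== VERDICT (by name: the statement is the Claim_ definition above) =====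
theorem line_looks_like_label_py_spec : Claim_equal_line_looks_like_label_py := by
  intro nl kl _
  unfold Spec_line_looks_like_label_py line_looks_like_label_py line_looks_like_label_py_alt
  split
  · rfl
  · apply Bool.coe_iff_coe.mp
    rw [pvA_iff kl nl.toList, pvScan_iff kl [] nl.toList]
    simp
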